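-- pv_equiv track=rewrite | github.com/brockobill/ADL | AdelePractice/adele_python_scripting_practice1.16_ANSWER.py | IntSum
-- ===== SOURCE A (Python) =====
-- def IntSum(list1, list2):
--     size_a = len(list1)
--     size_b = len(list2)
--
--     if (size_a == 0 or size_b == 0):
--         return 0
--     total = 0
--     x = 0
--     y = 0
--     z = 0
--     duplicate = 0
--     temp = []
--     while x < size_a:
--         while y < size_b:
--             if list1[x] == list2[y]:
--                 size_temp = len(temp)
--                 while z < size_temp:
--                     if list1[x] == temp[z]:
--                         duplicate = 1
--                     z = z+1
--                 if duplicate == 0: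
--                     total = total+list1[x]
--                     temp.append(list1[x])
--             z = 0
--             duplicate = 0
--             y = y+1
--         y = 0
--         x = x+1
--     return total
-- ===== SOURCE B (Python) =====
-- def IntSum(list1, list2):
--     s2 = set(list2)
--     seen = set()
--     total = 0
--     for v in list1:
--         if v in s2 and v not in seen:
--             seen.add(v)
--             total += v
--     return total
-- ===== Notes on version B (the rewrite author's own statement) =====
-- stated objective: faster
-- what changed: Replaced the triple nested index loops (scan of list2 for each element of list1, plus a linear duplicate scan of the temp list) with a single pass over list1 using two hash sets (set(list2) for membership, a seen-set for distinctness).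
import Mathlib
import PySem

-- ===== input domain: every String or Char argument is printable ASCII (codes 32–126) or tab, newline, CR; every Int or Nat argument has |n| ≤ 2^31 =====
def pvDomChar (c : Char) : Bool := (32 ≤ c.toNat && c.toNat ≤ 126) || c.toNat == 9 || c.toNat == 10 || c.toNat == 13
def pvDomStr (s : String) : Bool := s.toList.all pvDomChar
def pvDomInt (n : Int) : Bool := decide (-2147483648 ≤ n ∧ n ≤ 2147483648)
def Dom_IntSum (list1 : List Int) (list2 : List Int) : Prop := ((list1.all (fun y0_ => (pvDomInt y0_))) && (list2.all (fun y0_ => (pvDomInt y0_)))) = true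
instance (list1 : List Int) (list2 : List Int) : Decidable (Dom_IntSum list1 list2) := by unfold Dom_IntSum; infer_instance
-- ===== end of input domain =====

-- B replaces A's triple nested scans with one pass over list1 using two sets (objective: faster).

-- ===== PORT A =====
-- the z-loop: scan temp and set duplicate=1 on a match
def pvDupScan (a : Int) (temp : List Int) : Int :=
  temp.foldl (fun dup t => if a = t then 1 else dup) 0

-- the y-loop over list2, state (total, temp)
def pvInnerY (list2 : List Int) (a : Int) (st : Int × List Int) : Int × List Int :=
  list2.foldl (fun st b =>
    if a = b then
      if pvDupScan a st.2 = 0 then (st.1 + a, st.2 ++ [a]) else st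
    else st) st

def IntSum (list1 : List Int) (list2 : List Int) : Int :=
  if list1.length = 0 ∨ list2.length = 0 then 0
  else (list1.foldl (fun st a => pvInnerY list2 a st) (0, [])).1

-- ===== PORT B =====
-- s2 = set(list2), built once; seen accumulates distinct summed values
def IntSum_alt (list1 : List Int) (list2 : List Int) : Int :=
  (list1.foldl (fun (st : Int × PySem.Set Int) v =>
      if PySem.Set.contains (PySem.Set.ofList list2) v && !(PySem.Set.contains st.2 v)
      then (st.1 + v, PySem.Set.add st.2 v) else st)
    ((0 : Int), PySem.Set.empty)).1

-- ===== PRECONDITION & SPEC =====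
def Spec_IntSum (list1 : List Int) (list2 : List Int) (out : Int) : Prop := out = IntSum_alt list1 list2
instance (list1 : List Int) (list2 : List Int) (out : Int) : Decidable (Spec_IntSum list1 list2 out) := by unfold Spec_IntSum; infer_instance

-- ===== CLAIM (what is proved, stated in full; the proofs are below) =====
def Claim_equal_IntSum : Prop := ∀ (list1 : List Int) (list2 : List Int), Dom_IntSum list1 list2 → Spec_IntSum list1 list2 (IntSum list1 list2)

-- ===== LEMMAS AND PROOFS =====

theorem pvDupScan_eq (a : Int) (temp : List Int) :
    pvDupScan a temp = if a ∈ temp then 1 else 0 := by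
  induction temp using List.reverseRecOn with
  | nil => simp [pvDupScan]
  | append_singleton xs x ih =>
    simp only [pvDupScan, List.foldl_append, List.foldl_cons, List.foldl_nil] at *
    by_cases h : a = x <;> simp [h, ih]

-- the whole y-loop adds a once iff a occurs in list2 and is not yet in temp
theorem pvInnerY_eq (list2 : List Int) (a : Int) (t : Int) (temp : List Int) :
    pvInnerY list2 a (t, temp) =
      if a ∈ list2 ∧ a ∉ temp then (t + a, temp ++ [a]) else (t, temp) := by
  induction list2 generalizing t temp with
  | nil => simp [pvInnerY]
  | cons b bs ih =>
    simp only [pvInnerY, List.foldl_cons, pvDupScan_eq] at *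
    by_cases hab : a = b
    · subst hab
      by_cases hmem : a ∈ temp
      · rw [if_pos rfl, if_pos hmem, if_neg (one_ne_zero (α := ℤ)), ih]
        simp [hmem]
      · rw [if_pos rfl, if_neg hmem, if_pos rfl, ih]
        simp [hmem]
    · rw [if_neg hab, ih]
      by_cases hbs : a ∈ bs <;> simp [hbs, hab]

-- A's outer loop and B's loop carry literally the same state
theorem pvFold_eq (list2 : List Int) (list1 : List Int) (t : Int) (temp : List Int) :
    list1.foldl (fun st a => pvInnerY list2 a st) (t, temp) =
    list1.foldl (fun (st : Int × PySem.Set Int) v =>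
        if PySem.Set.contains (PySem.Set.ofList list2) v && !(PySem.Set.contains st.2 v)
        then (st.1 + v, PySem.Set.add st.2 v) else st) (t, temp) := by
  induction list1 generalizing t temp with
  | nil => rfl
  | cons a l1 ih =>
    simp only [List.foldl_cons]
    rw [pvInnerY_eq]
    by_cases h2 : a ∈ list2
    · by_cases ht : a ∈ temp
      · simp [h2, ht, ih]
      · simp [h2, ht, PySem.Set.add, PySem.Set.contains, ih]
    · simp [h2, ih]

-- with list2 = [] the y-loop body never runs, so A's outer loop is the identity
theorem pvFoldA_nil (list1 : List Int) (st : Int × List Int) :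
    list1.foldl (fun st a => pvInnerY [] a st) st = st := by
  induction list1 generalizing st with
  | nil => rfl
  | cons a l ih =>
    simp only [List.foldl_cons, pvInnerY, List.foldl_nil]
    exact ih _

-- ===== VERDICT (by name: the statement is the Claim_ definition above) =====
theorem IntSum_spec : Claim_equal_IntSum := by
  intro list1 list2 _
  show IntSum list1 list2 = IntSum_alt list1 list2
  unfold IntSum IntSum_alt
  rcases Decidable.em (list1.length = 0 ∨ list2.length = 0) with h | h
  · rcases h with h | h
    · simp_all [List.length_eq_zero_iff.mp h, PySem.Set.empty]
    · have h2 : list2 = [] := List.length_eq_zero_iff.mp h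
      subst h2
      have hz : (if list1.length = 0 ∨ ([] : List Int).length = 0 then (0:Int)
          else (list1.foldl (fun st a => pvInnerY [] a st) ((0:Int), ([] : List Int))).1) = 0 := by
        simp
      rw [hz]
      rw [show (PySem.Set.empty : PySem.Set Int) = ([] : List Int) from rfl]
      rw [← pvFold_eq, pvFoldA_nil]
  · rw [if_neg h]
    rw [show (PySem.Set.empty : PySem.Set Int) = ([] : List Int) from rfl]
    rw [pvFold_eq]
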